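-- pv_equiv track=rewrite | github.com/saxomanu/carrier-delivery-chronopost | delivery_carrier_chronopost/models/stock.py | map_exception_msg
-- ===== SOURCE A (Python) =====
-- def map_exception_msg(message):
--     model_mapping = {
--         'skybill': 'Stock Tracking or Carrier',
--         'ref': 'Stock Picking',
--         'esd': 'Carrier Tracking',
--         'address': 'Partner / Customer',
--         'header': 'Chronopost account',
--     }
--     for key, val in model_mapping.items():
--         message = message.replace('(model: ' + key, '\n(check model: ' + val)
--     return message
-- ===== SOURCE B (Python) =====
-- def map_exception_msg(message):
--     patterns = [
--         ('(model: skybill', '\n(check model: Stock Tracking or Carrier'),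
--         ('(model: ref', '\n(check model: Stock Picking'),
--         ('(model: esd', '\n(check model: Carrier Tracking'),
--         ('(model: address', '\n(check model: Partner / Customer'),
--         ('(model: header', '\n(check model: Chronopost account'),
--     ]
--     out = []
--     i = 0
--     n = len(message)
--     while i < n:
--         for pat, rep in patterns:
--             if message.startswith(pat, i):
--                 out.append(rep)
--                 i += len(pat)
--                 break
--         else:
--             out.append(message[i])
--             i += 1
--     return ''.join(out)
-- ===== Notes on version B (the rewrite author's own statement) =====
-- stated objective: alternative
-- what changed: Replaces A's five sequential full-string str.replace passes with a single left-to-right scan that at each position tries the five precomputed marker patterns and emits either the replacement text or the current character.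
import Mathlib
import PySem

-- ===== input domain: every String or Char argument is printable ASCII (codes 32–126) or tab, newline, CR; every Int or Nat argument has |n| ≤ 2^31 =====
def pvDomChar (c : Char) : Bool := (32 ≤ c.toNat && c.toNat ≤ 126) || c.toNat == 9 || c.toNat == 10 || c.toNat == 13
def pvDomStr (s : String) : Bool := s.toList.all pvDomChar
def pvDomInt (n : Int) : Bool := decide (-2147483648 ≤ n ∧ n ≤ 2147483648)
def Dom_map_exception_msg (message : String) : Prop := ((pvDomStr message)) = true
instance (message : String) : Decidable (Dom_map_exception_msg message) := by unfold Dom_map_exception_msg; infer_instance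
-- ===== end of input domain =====

set_option maxRecDepth 10000

-- B replaces A's five sequential full-string replace passes with one left-to-right scan; objective: alternative (single pass, same values).

-- ===== PORT A =====
def map_exception_msg (message : String) : String :=
  let model_mapping : PySem.Dict String String := PySem.Dict.ofList
    [("skybill", "Stock Tracking or Carrier"),
     ("ref", "Stock Picking"),
     ("esd", "Carrier Tracking"),
     ("address", "Partner / Customer"),
     ("header", "Chronopost account")]
  model_mapping.items.foldl
    (fun m kv => PySem.Str.replace m ("(model: " ++ kv.1) ("\n(check model: " ++ kv.2)) message

-- ===== PORT B =====
-- the precomputed (pattern, replacement) pairs, as in Source B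
def pvPat1 : List Char := "(model: skybill".toList
def pvPat2 : List Char := "(model: ref".toList
def pvPat3 : List Char := "(model: esd".toList
def pvPat4 : List Char := "(model: address".toList
def pvPat5 : List Char := "(model: header".toList
def pvRep1 : List Char := "\n(check model: Stock Tracking or Carrier".toList
def pvRep2 : List Char := "\n(check model: Stock Picking".toList
def pvRep3 : List Char := "\n(check model: Carrier Tracking".toList
def pvRep4 : List Char := "\n(check model: Partner / Customer".toList
def pvRep5 : List Char := "\n(check model: Chronopost account".toList

def pvPatterns : List (List Char × List Char) :=
  [(pvPat1, pvRep1), (pvPat2, pvRep2), (pvPat3, pvRep3), (pvPat4, pvRep4), (pvPat5, pvRep5)]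

-- the inner `for pat, rep in patterns: if message.startswith(pat, i): break / else:` of Source B
def pvFirstMatch : List (List Char × List Char) → List Char → Option (List Char × List Char)
  | [], _ => none
  | (p, v) :: rest, l => if p.isPrefixOf l then some (p, v) else pvFirstMatch rest l

theorem pvFirstMatch_mem {ps : List (List Char × List Char)} {l : List Char}
    {p v : List Char} (h : pvFirstMatch ps l = some (p, v)) : (p, v) ∈ ps := by
  induction ps with
  | nil => simp [pvFirstMatch] at h
  | cons hd tl ih =>
    obtain ⟨p', v'⟩ := hd
    simp only [pvFirstMatch] at h
    split at h
    · simp at h; simp [h]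
    · exact List.mem_cons_of_mem _ (ih h)

theorem pvPatterns_len {p v : List Char} (h : (p, v) ∈ pvPatterns) : 1 ≤ p.length := by
  fin_cases h <;> decide

-- the outer `while i < n` scan of Source B, recursing on the remaining characters
def pvScan (l : List Char) : List Char :=
  match l with
  | [] => []
  | c :: t =>
    match h : pvFirstMatch pvPatterns (c :: t) with
    | some (p, v) => v ++ pvScan ((c :: t).drop p.length)
    | none => c :: pvScan t
termination_by l.length
decreasing_by
  · have h1 := pvPatterns_len (pvFirstMatch_mem h)
    simp; omega
  · simp

def map_exception_msg_alt (message : String) : String :=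
  String.ofList (pvScan message.toList)

-- ===== PRECONDITION & SPEC =====
def Spec_map_exception_msg (message : String) (out : String) : Prop := out = map_exception_msg_alt message
instance (message : String) (out : String) : Decidable (Spec_map_exception_msg message out) := by unfold Spec_map_exception_msg; infer_instance

-- ===== CLAIM (what is proved, stated in full; the proofs are below) =====
def Claim_equal_map_exception_msg : Prop := ∀ (message : String), Dom_map_exception_msg message → Spec_map_exception_msg message (map_exception_msg message)

-- ===== LEMMAS AND PROOFS =====

-- structural form of Python's str.replace (old ≠ []), used to reason about A's passes
def pvRep (old new : List Char) (l : List Char) : List Char :=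
  match l with
  | [] => []
  | c :: t =>
    if old.isPrefixOf (c :: t) then new ++ pvRep old new ((c :: t).drop (max old.length 1))
    else c :: pvRep old new t
termination_by l.length
decreasing_by
  all_goals simp

theorem pvRep_nil (old new : List Char) : pvRep old new [] = [] := by simp [pvRep]

theorem pvRep_cons_neg {old : List Char} (new : List Char) {c : Char} {t : List Char}
    (h : ¬ old <+: c :: t) : pvRep old new (c :: t) = c :: pvRep old new t := by
  rw [pvRep]
  simp [List.isPrefixOf_iff_prefix, h]

theorem pvRep_pos {old : List Char} (new : List Char) {l : List Char}
    (hold : old ≠ []) (h : old <+: l) :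
    pvRep old new l = new ++ pvRep old new (l.drop old.length) := by
  cases l with
  | nil => exact absurd (List.prefix_nil.mp h) hold
  | cons c t =>
    rw [pvRep]
    have h1 : 1 ≤ old.length := List.length_pos_iff.mpr hold
    simp [List.isPrefixOf_iff_prefix, h, Nat.max_eq_left h1]

theorem pvGo_eq {old new : List Char} (hold : old ≠ []) :
    ∀ (fuel : Nat) (l acc : List Char), l.length ≤ fuel →
      PySem.Chars.replace.go old new fuel l acc = acc.reverse ++ pvRep old new l := by
  intro fuel
  induction fuel with
  | zero =>
    intro l acc hl
    have hnil : l = [] := List.eq_nil_of_length_eq_zero (Nat.le_zero.mp hl)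
    subst hnil
    simp [PySem.Chars.replace.go, pvRep_nil]
  | succ n ih =>
    intro l acc hl
    cases l with
    | nil => simp [PySem.Chars.replace.go, pvRep_nil]
    | cons c t =>
      have h1 : 1 ≤ old.length := List.length_pos_iff.mpr hold
      rw [PySem.Chars.replace.go]
      by_cases hp : old.isPrefixOf (c :: t)
      · rw [if_pos hp]
        have hpre : old <+: c :: t := List.isPrefixOf_iff_prefix.mp hp
        rw [ih _ _ (by simp at hl ⊢; omega)]
        rw [pvRep_pos _ hold hpre]
        simp
      · rw [if_neg hp]
        rw [ih _ _ (by simp at hl; omega)]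
        rw [pvRep_cons_neg _ (fun hc => hp (List.isPrefixOf_iff_prefix.mpr hc))]
        simp

theorem pvReplace_eq {old : List Char} (new l : List Char) (hold : old ≠ []) :
    PySem.Chars.replace l old new = pvRep old new l := by
  rw [PySem.Chars.replace]
  rw [if_neg (by simpa using hold)]
  simpa using pvGo_eq hold l.length l [] le_rfl

theorem pvTake_of_prefix_append {p u x : List Char} (h : p <+: u ++ x) :
    p.take u.length = u.take p.length := by
  have hp : p = (u ++ x).take p.length := List.prefix_iff_eq_take.mp h
  have hu : (u ++ x).take u.length = u := List.take_left
  calc p.take u.length = ((u ++ x).take p.length).take u.length := by rw [← hp]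
    _ = (u ++ x).take (min u.length p.length) := by rw [List.take_take]
    _ = ((u ++ x).take u.length).take p.length := by rw [List.take_take, Nat.min_comm]
    _ = u.take p.length := by rw [hu]

theorem pvRep_pass {old : List Char} (new : List Char) (pre x : List Char) (hold : old ≠ [])
    (h : ∀ i < pre.length, (pre.drop i).take old.length ≠ old.take (pre.length - i)) :
    pvRep old new (pre ++ x) = pre ++ pvRep old new x := by
  induction pre with
  | nil => simp
  | cons c pre' ih =>
    have h0 := h 0 (by simp)
    simp only [List.drop_zero, Nat.sub_zero] at h0
    have hnp : ¬ old <+: (c :: pre') ++ x := fun hc => h0 (pvTake_of_prefix_append hc).symm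
    rw [List.cons_append, pvRep_cons_neg _ (by simpa using hnp)]
    rw [ih (fun i hi => by
      have := h (i + 1) (by simp; omega)
      simpa using this)]
    simp

theorem pvRep_pb (pt nt : List Char) :
    ∀ (s q : List Char), (∀ a ∈ q, a ≠ '(' ∧ a ≠ '\n') →
      (q <+: pvRep ('(' :: pt) ('\n' :: nt) s ↔ q <+: s) := by
  have main : ∀ (n : Nat) (s q : List Char), s.length ≤ n → (∀ a ∈ q, a ≠ '(' ∧ a ≠ '\n') →
      (q <+: pvRep ('(' :: pt) ('\n' :: nt) s ↔ q <+: s) := by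
    intro n
    induction n with
    | zero =>
      intro s q hs _
      have hnil : s = [] := List.eq_nil_of_length_eq_zero (Nat.le_zero.mp hs)
      subst hnil
      rw [pvRep_nil]
    | succ n ih =>
      intro s q hs hq
      cases s with
      | nil => rw [pvRep_nil]
      | cons c t =>
        by_cases hp : ('(' :: pt) <+: c :: t
        · have hc : c = '(' := ((List.cons_prefix_cons.mp hp).1).symm
          rw [pvRep_pos _ (by simp) hp]
          cases q with
          | nil => simp
          | cons a q' =>
            refine iff_of_false (fun hh => ?_) (fun hh => ?_)
            · rw [List.cons_append, List.cons_prefix_cons] at hh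
              exact (hq a (by simp)).2 hh.1
            · rw [List.cons_prefix_cons] at hh
              exact (hq a (by simp)).1 (hh.1.trans hc)
        · rw [pvRep_cons_neg _ hp]
          cases q with
          | nil => simp
          | cons a q' =>
            rw [List.cons_prefix_cons, List.cons_prefix_cons]
            exact and_congr Iff.rfl
              (ih t q' (by simpa using hs) (fun a ha => hq a (by simp [ha])))
  intro s q hq
  exact main s.length s q le_rfl hq

-- A's five passes composed
def pvComp (s : List Char) : List Char :=
  pvRep pvPat5 pvRep5 (pvRep pvPat4 pvRep4 (pvRep pvPat3 pvRep3 (pvRep pvPat2 pvRep2 (pvRep pvPat1 pvRep1 s))))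

-- literal shapes of the patterns and replacements
theorem pvPat1_eq : pvPat1 = '(' :: "model: skybill".toList := by decide
theorem pvPat2_eq : pvPat2 = '(' :: "model: ref".toList := by decide
theorem pvPat3_eq : pvPat3 = '(' :: "model: esd".toList := by decide
theorem pvPat4_eq : pvPat4 = '(' :: "model: address".toList := by decide
theorem pvPat5_eq : pvPat5 = '(' :: "model: header".toList := by decide
theorem pvRep1_eq : pvRep1 = '\n' :: "(check model: Stock Tracking or Carrier".toList := by decide
theorem pvRep2_eq : pvRep2 = '\n' :: "(check model: Stock Picking".toList := by decide
theorem pvRep3_eq : pvRep3 = '\n' :: "(check model: Carrier Tracking".toList := by decide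
theorem pvRep4_eq : pvRep4 = '\n' :: "(check model: Partner / Customer".toList := by decide

-- pulled-back prefixes: a '('-free, '\n'-free word is a prefix of a pass's output iff of its input
theorem pvPB1 (s q : List Char) (hq : ∀ a ∈ q, a ≠ '(' ∧ a ≠ '\n') :
    q <+: pvRep pvPat1 pvRep1 s ↔ q <+: s := by
  rw [pvPat1_eq, pvRep1_eq]; exact pvRep_pb _ _ s q hq
theorem pvPB2 (s q : List Char) (hq : ∀ a ∈ q, a ≠ '(' ∧ a ≠ '\n') :
    q <+: pvRep pvPat2 pvRep2 s ↔ q <+: s := by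
  rw [pvPat2_eq, pvRep2_eq]; exact pvRep_pb _ _ s q hq
theorem pvPB3 (s q : List Char) (hq : ∀ a ∈ q, a ≠ '(' ∧ a ≠ '\n') :
    q <+: pvRep pvPat3 pvRep3 s ↔ q <+: s := by
  rw [pvPat3_eq, pvRep3_eq]; exact pvRep_pb _ _ s q hq
theorem pvPB4 (s q : List Char) (hq : ∀ a ∈ q, a ≠ '(' ∧ a ≠ '\n') :
    q <+: pvRep pvPat4 pvRep4 s ↔ q <+: s := by
  rw [pvPat4_eq, pvRep4_eq]; exact pvRep_pb _ _ s q hq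

theorem pvNP {c : Char} (hc : c ≠ '(') {pat q : List Char} (he : pat = '(' :: q)
    (X : List Char) : ¬ pat <+: c :: X := by
  rw [he]; intro hp; exact hc ((List.cons_prefix_cons.mp hp).1).symm

theorem pvNC {pat q : List Char} (he : pat = '(' :: q) {X t : List Char}
    (hiff : q <+: X ↔ q <+: t) (hno : ¬ pat <+: '(' :: t) : ¬ pat <+: '(' :: X := by
  subst he
  intro hp
  rw [List.cons_prefix_cons] at hp
  exact hno (List.cons_prefix_cons.mpr ⟨rfl, hiff.mp hp.2⟩)

-- pvScan unfolding lemmas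
theorem pvScan_nil : pvScan [] = [] := by rw [pvScan]

theorem pvScan_pos {l p v : List Char} (hne : l ≠ [])
    (h : pvFirstMatch pvPatterns l = some (p, v)) :
    pvScan l = v ++ pvScan (l.drop p.length) := by
  cases l with
  | nil => exact absurd rfl hne
  | cons c t =>
    rw [pvScan]
    split
    · next p' v' h' =>
      have := h'.symm.trans h
      injection this with this
      injection this with hp hv
      subst hp; subst hv; rfl
    · next h' => rw [h'] at h; cases h

theorem pvScan_cons_neg {c : Char} {t : List Char}
    (h : pvFirstMatch pvPatterns (c :: t) = none) : pvScan (c :: t) = c :: pvScan t := by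
  rw [pvScan]
  split
  · next p' v' h' => rw [h'] at h; cases h
  · rfl

-- pvFirstMatch evaluation
theorem pvFM1 {l : List Char} (h : pvPat1 <+: l) :
    pvFirstMatch pvPatterns l = some (pvPat1, pvRep1) := by
  simp [pvFirstMatch, pvPatterns, List.isPrefixOf_iff_prefix, h]
theorem pvFM2 {l : List Char} (h1 : ¬ pvPat1 <+: l) (h : pvPat2 <+: l) :
    pvFirstMatch pvPatterns l = some (pvPat2, pvRep2) := by
  simp [pvFirstMatch, pvPatterns, List.isPrefixOf_iff_prefix, h1, h]
theorem pvFM3 {l : List Char} (h1 : ¬ pvPat1 <+: l) (h2 : ¬ pvPat2 <+: l) (h : pvPat3 <+: l) :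
    pvFirstMatch pvPatterns l = some (pvPat3, pvRep3) := by
  simp [pvFirstMatch, pvPatterns, List.isPrefixOf_iff_prefix, h1, h2, h]
theorem pvFM4 {l : List Char} (h1 : ¬ pvPat1 <+: l) (h2 : ¬ pvPat2 <+: l) (h3 : ¬ pvPat3 <+: l)
    (h : pvPat4 <+: l) : pvFirstMatch pvPatterns l = some (pvPat4, pvRep4) := by
  simp [pvFirstMatch, pvPatterns, List.isPrefixOf_iff_prefix, h1, h2, h3, h]
theorem pvFM5 {l : List Char} (h1 : ¬ pvPat1 <+: l) (h2 : ¬ pvPat2 <+: l) (h3 : ¬ pvPat3 <+: l)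
    (h4 : ¬ pvPat4 <+: l) (h : pvPat5 <+: l) :
    pvFirstMatch pvPatterns l = some (pvPat5, pvRep5) := by
  simp [pvFirstMatch, pvPatterns, List.isPrefixOf_iff_prefix, h1, h2, h3, h4, h]
theorem pvFM0 {l : List Char} (h1 : ¬ pvPat1 <+: l) (h2 : ¬ pvPat2 <+: l) (h3 : ¬ pvPat3 <+: l)
    (h4 : ¬ pvPat4 <+: l) (h5 : ¬ pvPat5 <+: l) : pvFirstMatch pvPatterns l = none := by
  simp [pvFirstMatch, pvPatterns, List.isPrefixOf_iff_prefix, h1, h2, h3, h4, h5]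

-- the composition fires exactly like the scan when a pattern sits at the front
theorem pvFire1 (w : List Char) : pvComp (pvPat1 ++ w) = pvRep1 ++ pvComp w := by
  unfold pvComp
  rw [pvRep_pos pvRep1 (by decide) (List.prefix_append _ _), List.drop_left,
      pvRep_pass pvRep2 pvRep1 _ (by decide) (by decide),
      pvRep_pass pvRep3 pvRep1 _ (by decide) (by decide),
      pvRep_pass pvRep4 pvRep1 _ (by decide) (by decide),
      pvRep_pass pvRep5 pvRep1 _ (by decide) (by decide)]

theorem pvFire2 (w : List Char) : pvComp (pvPat2 ++ w) = pvRep2 ++ pvComp w := by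
  unfold pvComp
  rw [pvRep_pass pvRep1 pvPat2 _ (by decide) (by decide),
      pvRep_pos pvRep2 (by decide) (List.prefix_append _ _), List.drop_left,
      pvRep_pass pvRep3 pvRep2 _ (by decide) (by decide),
      pvRep_pass pvRep4 pvRep2 _ (by decide) (by decide),
      pvRep_pass pvRep5 pvRep2 _ (by decide) (by decide)]

theorem pvFire3 (w : List Char) : pvComp (pvPat3 ++ w) = pvRep3 ++ pvComp w := by
  unfold pvComp
  rw [pvRep_pass pvRep1 pvPat3 _ (by decide) (by decide),
      pvRep_pass pvRep2 pvPat3 _ (by decide) (by decide),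
      pvRep_pos pvRep3 (by decide) (List.prefix_append _ _), List.drop_left,
      pvRep_pass pvRep4 pvRep3 _ (by decide) (by decide),
      pvRep_pass pvRep5 pvRep3 _ (by decide) (by decide)]

theorem pvFire4 (w : List Char) : pvComp (pvPat4 ++ w) = pvRep4 ++ pvComp w := by
  unfold pvComp
  rw [pvRep_pass pvRep1 pvPat4 _ (by decide) (by decide),
      pvRep_pass pvRep2 pvPat4 _ (by decide) (by decide),
      pvRep_pass pvRep3 pvPat4 _ (by decide) (by decide),
      pvRep_pos pvRep4 (by decide) (List.prefix_append _ _), List.drop_left,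
      pvRep_pass pvRep5 pvRep4 _ (by decide) (by decide)]

theorem pvFire5 (w : List Char) : pvComp (pvPat5 ++ w) = pvRep5 ++ pvComp w := by
  unfold pvComp
  rw [pvRep_pass pvRep1 pvPat5 _ (by decide) (by decide),
      pvRep_pass pvRep2 pvPat5 _ (by decide) (by decide),
      pvRep_pass pvRep3 pvPat5 _ (by decide) (by decide),
      pvRep_pass pvRep4 pvPat5 _ (by decide) (by decide),
      pvRep_pos pvRep5 (by decide) (List.prefix_append _ _), List.drop_left]

theorem pvQ2_ok : ∀ a ∈ "model: ref".toList, a ≠ '(' ∧ a ≠ '\n' := by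
  have h : "model: ref".toList.all (fun a => decide (a ≠ '(') && decide (a ≠ '\n')) = true := rfl
  intro a ha
  simpa using List.all_eq_true.mp h a ha
theorem pvQ3_ok : ∀ a ∈ "model: esd".toList, a ≠ '(' ∧ a ≠ '\n' := by
  have h : "model: esd".toList.all (fun a => decide (a ≠ '(') && decide (a ≠ '\n')) = true := rfl
  intro a ha
  simpa using List.all_eq_true.mp h a ha
theorem pvQ4_ok : ∀ a ∈ "model: address".toList, a ≠ '(' ∧ a ≠ '\n' := by
  have h : "model: address".toList.all (fun a => decide (a ≠ '(') && decide (a ≠ '\n')) = true := rfl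
  intro a ha
  simpa using List.all_eq_true.mp h a ha
theorem pvQ5_ok : ∀ a ∈ "model: header".toList, a ≠ '(' ∧ a ≠ '\n' := by
  have h : "model: header".toList.all (fun a => decide (a ≠ '(') && decide (a ≠ '\n')) = true := rfl
  intro a ha
  simpa using List.all_eq_true.mp h a ha

theorem pvMain : ∀ (n : Nat) (l : List Char), l.length ≤ n → pvComp l = pvScan l := by
  intro n
  induction n with
  | zero =>
    intro l hl
    have hnil : l = [] := List.eq_nil_of_length_eq_zero (Nat.le_zero.mp hl)
    subst hnil
    rw [pvScan_nil]; simp [pvComp, pvRep_nil]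
  | succ n ih =>
    intro l hl
    cases l with
    | nil => rw [pvScan_nil]; simp [pvComp, pvRep_nil]
    | cons c t =>
      simp only [List.length_cons] at hl
      by_cases h1 : pvPat1 <+: c :: t
      · obtain ⟨w, hw⟩ := h1
        have hlen : w.length ≤ n := by
          have hlw := congrArg List.length hw
          have h15 : pvPat1.length = 15 := by decide
          simp only [List.length_append, List.length_cons, h15] at hlw
          omega
        rw [← hw, pvFire1 w,
            pvScan_pos (by rw [pvPat1_eq]; simp) (pvFM1 (List.prefix_append _ _)),
            List.drop_left]
        exact congrArg (pvRep1 ++ ·) (ih w hlen)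
      · by_cases h2 : pvPat2 <+: c :: t
        · obtain ⟨w, hw⟩ := h2
          have hlen : w.length ≤ n := by
            have hlw := congrArg List.length hw
            have h11 : pvPat2.length = 11 := by decide
            simp only [List.length_append, List.length_cons, h11] at hlw
            omega
          rw [← hw, pvFire2 w,
              pvScan_pos (by rw [pvPat2_eq]; simp) (pvFM2 (hw ▸ h1) (List.prefix_append _ _)),
              List.drop_left]
          exact congrArg (pvRep2 ++ ·) (ih w hlen)
        · by_cases h3 : pvPat3 <+: c :: t
          · obtain ⟨w, hw⟩ := h3
            have hlen : w.length ≤ n := by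
              have hlw := congrArg List.length hw
              have h11 : pvPat3.length = 11 := by decide
              simp only [List.length_append, List.length_cons, h11] at hlw
              omega
            rw [← hw, pvFire3 w,
                pvScan_pos (by rw [pvPat3_eq]; simp)
                  (pvFM3 (hw ▸ h1) (hw ▸ h2) (List.prefix_append _ _)),
                List.drop_left]
            exact congrArg (pvRep3 ++ ·) (ih w hlen)
          · by_cases h4 : pvPat4 <+: c :: t
            · obtain ⟨w, hw⟩ := h4
              have hlen : w.length ≤ n := by
                have hlw := congrArg List.length hw
                have h15 : pvPat4.length = 15 := by decide
                simp only [List.length_append, List.length_cons, h15] at hlw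
                omega
              rw [← hw, pvFire4 w,
                  pvScan_pos (by rw [pvPat4_eq]; simp)
                    (pvFM4 (hw ▸ h1) (hw ▸ h2) (hw ▸ h3) (List.prefix_append _ _)),
                  List.drop_left]
              exact congrArg (pvRep4 ++ ·) (ih w hlen)
            · by_cases h5 : pvPat5 <+: c :: t
              · obtain ⟨w, hw⟩ := h5
                have hlen : w.length ≤ n := by
                  have hlw := congrArg List.length hw
                  have h14 : pvPat5.length = 14 := by decide
                  simp only [List.length_append, List.length_cons, h14] at hlw
                  omega
                rw [← hw, pvFire5 w,
                    pvScan_pos (by rw [pvPat5_eq]; simp)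
                      (pvFM5 (hw ▸ h1) (hw ▸ h2) (hw ▸ h3) (hw ▸ h4) (List.prefix_append _ _)),
                    List.drop_left]
                exact congrArg (pvRep5 ++ ·) (ih w hlen)
              · -- no pattern matches at the front
                rw [pvScan_cons_neg (pvFM0 h1 h2 h3 h4 h5)]
                have iht := ih t (by omega)
                by_cases hc : c = '('
                · subst hc
                  have n2 : ¬ pvPat2 <+: '(' :: pvRep pvPat1 pvRep1 t :=
                    pvNC pvPat2_eq (pvPB1 t _ pvQ2_ok) h2
                  have n3 : ¬ pvPat3 <+: '(' :: pvRep pvPat2 pvRep2 (pvRep pvPat1 pvRep1 t) :=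
                    pvNC pvPat3_eq ((pvPB2 _ _ pvQ3_ok).trans (pvPB1 t _ pvQ3_ok)) h3
                  have n4 : ¬ pvPat4 <+: '(' :: pvRep pvPat3 pvRep3
                      (pvRep pvPat2 pvRep2 (pvRep pvPat1 pvRep1 t)) :=
                    pvNC pvPat4_eq ((pvPB3 _ _ pvQ4_ok).trans
                      ((pvPB2 _ _ pvQ4_ok).trans (pvPB1 t _ pvQ4_ok))) h4
                  have n5 : ¬ pvPat5 <+: '(' :: pvRep pvPat4 pvRep4 (pvRep pvPat3 pvRep3
                      (pvRep pvPat2 pvRep2 (pvRep pvPat1 pvRep1 t))) :=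
                    pvNC pvPat5_eq ((pvPB4 _ _ pvQ5_ok).trans ((pvPB3 _ _ pvQ5_ok).trans
                      ((pvPB2 _ _ pvQ5_ok).trans (pvPB1 t _ pvQ5_ok)))) h5
                  unfold pvComp
                  unfold pvComp at iht
                  rw [pvRep_cons_neg _ h1, pvRep_cons_neg _ n2, pvRep_cons_neg _ n3,
                      pvRep_cons_neg _ n4, pvRep_cons_neg _ n5, iht]
                · unfold pvComp
                  unfold pvComp at iht
                  rw [pvRep_cons_neg _ (pvNP hc pvPat1_eq _),
                      pvRep_cons_neg _ (pvNP hc pvPat2_eq _),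
                      pvRep_cons_neg _ (pvNP hc pvPat3_eq _),
                      pvRep_cons_neg _ (pvNP hc pvPat4_eq _),
                      pvRep_cons_neg _ (pvNP hc pvPat5_eq _), iht]

theorem pvA_unfold (m : String) :
    map_exception_msg m =
      PySem.Str.replace
        (PySem.Str.replace
          (PySem.Str.replace
            (PySem.Str.replace
              (PySem.Str.replace m "(model: skybill" "\n(check model: Stock Tracking or Carrier")
              "(model: ref" "\n(check model: Stock Picking")
            "(model: esd" "\n(check model: Carrier Tracking")
          "(model: address" "\n(check model: Partner / Customer")
        "(model: header" "\n(check model: Chronopost account" := rfl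

-- ===== VERDICT (by name: the statement is the Claim_ definition above) =====
theorem pvStrReplace_eq (s old new : String) (h : old.toList ≠ []) :
    PySem.Str.replace s old new = String.ofList (pvRep old.toList new.toList s.toList) := by
  show String.ofList (PySem.Chars.replace s.toList old.toList new.toList) = _
  rw [pvReplace_eq _ _ h]

theorem map_exception_msg_spec : Claim_equal_map_exception_msg := by
  intro m _
  unfold Spec_map_exception_msg map_exception_msg_alt
  rw [pvA_unfold,
      pvStrReplace_eq _ _ _ (by decide), pvStrReplace_eq _ _ _ (by decide),
      pvStrReplace_eq _ _ _ (by decide), pvStrReplace_eq _ _ _ (by decide),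
      pvStrReplace_eq _ _ _ (by decide)]
  simp only [String.toList_ofList]
  exact congrArg String.ofList (pvMain m.toList.length m.toList le_rfl)
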